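-- pv_equiv track=rewrite | github.com/dillweed/impractical-python-projects | 03_solving_anagrams/finding_voldemort_british.py | filter_digrams
-- ===== SOURCE A (Python) =====
-- def filter_digrams(word_list):
--     rejected_words = set()
--     word_list = set(word_list)
--     rejects = ['dt', 'lr', 'md', 'ml', 'mr', 'mt',
--                'mv', 'td', 'tv', 'vd', 'vl', 'vm', 'vr', 'vt']
--     first_pair_rejects = ['ld', 'lm', 'lt', 'lv',
--                           'rd', 'rl', 'rm', 'rt', 'rv', 'tl', 'tm']
--     for reject in rejects:
--         for name in word_list - rejected_words:
--             if reject in name: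
--                 rejected_words.add(name)
--     for reject in first_pair_rejects:
--         for name in word_list - rejected_words:
--             if name.startswith(reject):
--                 rejected_words.add(name)
--     return list(word_list - rejected_words)
-- ===== SOURCE B (Python) =====
-- def filter_digrams(word_list):
--     reject_set = {'dt', 'lr', 'md', 'ml', 'mr', 'mt',
--                   'mv', 'td', 'tv', 'vd', 'vl', 'vm', 'vr', 'vt'}
--     first_set = {'ld', 'lm', 'lt', 'lv',
--                  'rd', 'rl', 'rm', 'rt', 'rv', 'tl', 'tm'}
--     word_set = set(word_list)
--     rejected_set = set()
--     for name in word_set: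
--         digrams = {a + b for a, b in zip(name, name[1:])}
--         if digrams & reject_set or name[:2] in first_set:
--             rejected_set.add(name)
--     return list(word_set - rejected_set)
-- ===== Notes on version B (the rewrite author's own statement) =====
-- stated objective: faster
-- what changed: Replaces the pattern-major double scan (25 passes over the shrinking word set, each doing a substring search per word) with a single word-major pass that builds each word's digram set once and tests it against the two pattern sets by hash lookups; the final list(word_set - rejected_set) step is kept.
import Mathlib
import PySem

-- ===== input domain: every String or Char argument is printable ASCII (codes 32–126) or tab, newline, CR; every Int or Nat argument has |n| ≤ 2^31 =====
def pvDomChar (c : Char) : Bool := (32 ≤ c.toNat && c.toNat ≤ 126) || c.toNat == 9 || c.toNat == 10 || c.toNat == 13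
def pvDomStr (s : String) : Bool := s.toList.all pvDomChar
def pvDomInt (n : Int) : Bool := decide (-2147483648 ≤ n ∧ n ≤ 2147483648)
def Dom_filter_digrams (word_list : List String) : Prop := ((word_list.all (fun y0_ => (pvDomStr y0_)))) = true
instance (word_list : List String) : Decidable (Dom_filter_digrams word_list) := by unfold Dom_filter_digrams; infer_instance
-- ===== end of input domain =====

-- B replaces A's pattern-major double scan with one word-major pass over per-word digram sets;
-- equivalence of the RETURN value is proved (neither version mutates its argument).

-- ===== PORT A =====
def pvRejectsA : List String :=
  ["dt", "lr", "md", "ml", "mr", "mt", "mv", "td", "tv", "vd", "vl", "vm", "vr", "vt"]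
def pvFirstPairRejectsA : List String :=
  ["ld", "lm", "lt", "lv", "rd", "rl", "rm", "rt", "rv", "tl", "tm"]

def filter_digrams (word_list : List String) : List String :=
  -- word_list = set(word_list)
  let ws : PySem.Set String := PySem.Set.ofList word_list
  -- for reject in rejects: for name in word_list - rejected_words: if reject in name: add
  let rejected : PySem.Set String :=
    pvRejectsA.foldl (fun rej reject =>
      (PySem.Set.diff ws rej).foldl (fun acc name =>
        if PySem.Str.isIn reject name then PySem.Set.add acc name else acc) rej)
      PySem.Set.empty
  -- for reject in first_pair_rejects: for name in word_list - rejected_words: if name.startswith(reject): add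
  let rejected2 : PySem.Set String :=
    pvFirstPairRejectsA.foldl (fun rej reject =>
      (PySem.Set.diff ws rej).foldl (fun acc name =>
        if PySem.Str.startswith name reject then PySem.Set.add acc name else acc) rej)
      rejected
  -- return list(word_list - rejected_words)
  PySem.Set.diff ws rejected2

-- ===== PORT B =====
def pvRejectSetB : PySem.Set String := PySem.Set.ofList
  ["dt", "lr", "md", "ml", "mr", "mt", "mv", "td", "tv", "vd", "vl", "vm", "vr", "vt"]
def pvFirstSetB : PySem.Set String := PySem.Set.ofList
  ["ld", "lm", "lt", "lv", "rd", "rl", "rm", "rt", "rv", "tl", "tm"]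

-- {a + b for a, b in zip(name, name[1:])}: name[1:] is .tail (= PySem slice from 1);
-- a + b concatenates two single-char strings, exactly String.ofList [a, b]
def pvDigramsB (name : String) : PySem.Set String :=
  PySem.Set.ofList ((name.toList.zip name.toList.tail).map (fun p => String.ofList [p.1, p.2]))

def filter_digrams_alt (word_list : List String) : List String :=
  let ws : PySem.Set String := PySem.Set.ofList word_list
  -- for name in word_set: if digrams & reject_set or name[:2] in first_set: rejected_set.add(name)
  let rejected : PySem.Set String :=
    ws.foldl (fun r name =>
      if !(PySem.Set.inter (pvDigramsB name) pvRejectSetB).isEmpty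
          || PySem.Set.contains pvFirstSetB (PySem.Str.slice name none (some 2)) then
        PySem.Set.add r name
      else r) PySem.Set.empty
  -- return list(word_set - rejected_set)
  PySem.Set.diff ws rejected

-- ===== PRECONDITION & SPEC =====
def Spec_filter_digrams (word_list : List String) (out : List String) : Prop := out = filter_digrams_alt word_list
instance (word_list : List String) (out : List String) : Decidable (Spec_filter_digrams word_list out) := by unfold Spec_filter_digrams; infer_instance

-- ===== CLAIM (what is proved, stated in full; the proofs are below) =====
def Claim_equal_filter_digrams : Prop := ∀ (word_list : List String), Dom_filter_digrams word_list → Spec_filter_digrams word_list (filter_digrams word_list)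

-- ===== LEMMAS AND PROOFS =====

-- membership after an add-if fold
theorem pv_mem_foldl_addif (f : String → Bool) (pool : List String) (r : PySem.Set String)
    (x : String) :
    x ∈ pool.foldl (fun acc n => if f n then PySem.Set.add acc n else acc) r ↔
      x ∈ r ∨ (x ∈ pool ∧ f x = true) := by
  induction pool generalizing r with
  | nil => simp
  | cons n t ih =>
      simp only [List.foldl_cons, ih, List.mem_cons]
      split_ifs with hn
      · rw [PySem.Set.mem_add]
        constructor
        · rintro ((h | rfl) | ⟨hx, hf⟩)
          · exact Or.inl h
          · exact Or.inr ⟨Or.inl rfl, hn⟩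
          · exact Or.inr ⟨Or.inr hx, hf⟩
        · rintro (h | ⟨(rfl | hx), hf⟩)
          · exact Or.inl (Or.inl h)
          · exact Or.inl (Or.inr rfl)
          · exact Or.inr ⟨hx, hf⟩
      · constructor
        · rintro (h | ⟨hx, hf⟩)
          · exact Or.inl h
          · exact Or.inr ⟨Or.inr hx, hf⟩
        · rintro (h | ⟨(rfl | hx), hf⟩)
          · exact Or.inl h
          · exact absurd hf hn
          · exact Or.inr ⟨hx, hf⟩

-- membership after one whole pattern-major phase of A
theorem pv_mem_phase (m : String → String → Bool) (pats : List String)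
    (ws r : PySem.Set String) (x : String) :
    x ∈ pats.foldl (fun rej p =>
        (PySem.Set.diff ws rej).foldl (fun acc n =>
          if m p n then PySem.Set.add acc n else acc) rej) r ↔
      x ∈ r ∨ (x ∈ ws ∧ pats.any (fun p => m p x) = true) := by
  induction pats generalizing r with
  | nil => simp
  | cons p t ih =>
      simp only [List.foldl_cons, ih, pv_mem_foldl_addif, PySem.Set.mem_diff, List.any_cons,
        Bool.or_eq_true]
      constructor
      · rintro ((h | ⟨⟨hw, _⟩, hm⟩) | ⟨hw, ha⟩)
        · exact Or.inl h
        · exact Or.inr ⟨hw, Or.inl hm⟩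
        · exact Or.inr ⟨hw, Or.inr ha⟩
      · rintro (h | ⟨hw, hm | ha⟩)
        · exact Or.inl (Or.inl h)
        · by_cases hr : x ∈ r
          · exact Or.inl (Or.inl hr)
          · exact Or.inl (Or.inr ⟨⟨hw, hr⟩, hm⟩)
        · exact Or.inr ⟨hw, ha⟩

-- a two-character string occurs in cs iff its character pair is a consecutive pair of cs
theorem pv_infix_pair_iff (a b : Char) (cs : List Char) :
    [a, b] <:+: cs ↔ (a, b) ∈ cs.zip cs.tail := by
  induction cs with
  | nil => simp
  | cons c t ih =>
      rw [List.infix_cons_iff]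
      cases t with
      | nil =>
          simp only [List.zip_nil_right, List.tail_cons, List.not_mem_nil, iff_false]
          rintro (h | h)
          · exact absurd (List.IsPrefix.length_le h) (by simp)
          · exact absurd (List.eq_nil_of_infix_nil h) (by simp)
      | cons d r =>
          have ih' : [a, b] <:+: d :: r ↔ (a, b) ∈ (d :: r).zip r := by
            simpa using ih
          rw [List.tail_cons, List.zip_cons_cons, List.mem_cons, ih']
          constructor
          · rintro (hp | h)
            · obtain ⟨rfl, hp2⟩ := List.cons_prefix_cons.mp hp
              obtain ⟨rfl, -⟩ := List.cons_prefix_cons.mp hp2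
              exact Or.inl rfl
            · exact Or.inr h
          · rintro (he | h)
            · injection he with h1 h2
              subst h1; subst h2
              exact Or.inl (List.cons_prefix_cons.mpr ⟨rfl, List.cons_prefix_cons.mpr ⟨rfl, List.nil_prefix⟩⟩)
            · exact Or.inr h

theorem pv_isIn_two (a b : Char) (x : String) :
    PySem.Str.isIn (String.ofList [a, b]) x = true ↔ (a, b) ∈ x.toList.zip x.toList.tail := by
  rw [PySem.Str.isIn_eq, PySem.Chars.isIn_iff_infix, String.toList_ofList, pv_infix_pair_iff]

theorem pv_mem_digrams (a b : Char) (x : String) :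
    String.ofList [a, b] ∈ pvDigramsB x ↔ (a, b) ∈ x.toList.zip x.toList.tail := by
  rw [pvDigramsB, PySem.Set.mem_ofList, List.mem_map]
  constructor
  · rintro ⟨⟨u, v⟩, hm, he⟩
    have := congrArg String.toList he
    simp only [String.toList_ofList] at this
    obtain ⟨rfl, rfl⟩ : u = a ∧ v = b := by
      injection this with h1 h2; injection h2 with h2 _; exact ⟨h1, h2⟩
    exact hm
  · intro h
    exact ⟨(a, b), h, rfl⟩

theorem pv_startswith_two (a b : Char) (x : String) :
    PySem.Str.startswith x (String.ofList [a, b]) = true ↔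
      PySem.Str.slice x none (some 2) = String.ofList [a, b] := by
  have hslice : (PySem.Str.slice x none (some 2)).toList = x.toList.take 2 := by
    have h := PySem.List.slice_to (xs := x.toList) (b := 2) (by norm_num)
    rw [PySem.Str.toList_slice, PySem.Chars.slice_eq_listSlice, h]
    rfl
  rw [PySem.Str.startswith_eq, PySem.Chars.startswith_iff, String.toList_ofList,
    ← String.toList_inj, hslice, String.toList_ofList, List.prefix_iff_eq_take]
  constructor
  · intro h; exact h.symm
  · intro h; exact h.symm

-- every pattern of A is a two-character literal
theorem pv_rejects_shape : ∀ y ∈ pvRejectsA, ∃ a b, y = String.ofList [a, b] := by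
  intro y hy
  fin_cases hy <;> exact ⟨_, _, rfl⟩
theorem pv_firsts_shape : ∀ y ∈ pvFirstPairRejectsA, ∃ a b, y = String.ofList [a, b] := by
  intro y hy
  fin_cases hy <;> exact ⟨_, _, rfl⟩

-- the per-word condition of B agrees with "some pattern of A fires"
theorem pv_cond_eq (x : String) :
    (!(PySem.Set.inter (pvDigramsB x) pvRejectSetB).isEmpty
        || PySem.Set.contains pvFirstSetB (PySem.Str.slice x none (some 2))) = true ↔
      (pvRejectsA.any (fun p => PySem.Str.isIn p x) = true ∨
        pvFirstPairRejectsA.any (fun p => PySem.Str.startswith x p) = true) := by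
  rw [Bool.or_eq_true, Bool.not_eq_eq_eq_not, Bool.not_true]
  constructor
  · rintro (h | h)
    · left
      have hne : PySem.Set.inter (pvDigramsB x) pvRejectSetB ≠ [] := by
        intro he; rw [← List.isEmpty_iff] at he; exact absurd he (by simp [h])
      obtain ⟨y, hy⟩ := List.exists_mem_of_ne_nil _ hne
      rw [PySem.Set.mem_inter] at hy
      obtain ⟨hyd, hyr⟩ := hy
      have hyr' : y ∈ pvRejectsA := (PySem.Set.mem_ofList _ _).mp hyr
      obtain ⟨a, b, rfl⟩ := pv_rejects_shape y hyr'
      exact List.any_eq_true.mpr ⟨_, hyr', (pv_isIn_two a b x).mpr ((pv_mem_digrams a b x).mp hyd)⟩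
    · right
      have hm : PySem.Str.slice x none (some 2) ∈ pvFirstPairRejectsA :=
        (PySem.Set.mem_ofList _ _).mp ((PySem.Set.contains_iff _ _).mp h)
      obtain ⟨a, b, hab⟩ := pv_firsts_shape _ hm
      exact List.any_eq_true.mpr ⟨_, hm, by rw [hab] at hm ⊢; exact (pv_startswith_two a b x).mpr hab⟩
  · rintro (h | h)
    · left
      obtain ⟨y, hy, hin⟩ := List.any_eq_true.mp h
      obtain ⟨a, b, rfl⟩ := pv_rejects_shape y hy
      have hmem : String.ofList [a, b] ∈ PySem.Set.inter (pvDigramsB x) pvRejectSetB :=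
        (PySem.Set.mem_inter _ _ _).mpr
          ⟨(pv_mem_digrams a b x).mpr ((pv_isIn_two a b x).mp hin),
            (PySem.Set.mem_ofList _ _).mpr hy⟩
      cases hE : (PySem.Set.inter (pvDigramsB x) pvRejectSetB).isEmpty
      · rfl
      · rw [List.isEmpty_iff] at hE; rw [hE] at hmem; simp at hmem
    · right
      obtain ⟨y, hy, hsw⟩ := List.any_eq_true.mp h
      obtain ⟨a, b, rfl⟩ := pv_firsts_shape y hy
      rw [(pv_startswith_two a b x).mp hsw]
      exact (PySem.Set.contains_iff _ _).mpr ((PySem.Set.mem_ofList _ _).mpr hy)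

-- ===== VERDICT (by name: the statement is the Claim_ definition above) =====
theorem filter_digrams_spec : Claim_equal_filter_digrams := by
  intro word_list _
  show filter_digrams word_list = filter_digrams_alt word_list
  simp only [filter_digrams, filter_digrams_alt, PySem.Set.diff]
  refine List.filter_congr ?_
  intro x hx
  have hxw : x ∈ PySem.Set.ofList word_list := hx
  have hA : x ∈ pvFirstPairRejectsA.foldl (fun rej reject =>
        (PySem.Set.diff (PySem.Set.ofList word_list) rej).foldl (fun acc name =>
          if PySem.Str.startswith name reject then PySem.Set.add acc name else acc) rej)
      (pvRejectsA.foldl (fun rej reject =>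
        (PySem.Set.diff (PySem.Set.ofList word_list) rej).foldl (fun acc name =>
          if PySem.Str.isIn reject name then PySem.Set.add acc name else acc) rej)
        PySem.Set.empty) ↔
      (pvRejectsA.any (fun p => PySem.Str.isIn p x) = true ∨
        pvFirstPairRejectsA.any (fun p => PySem.Str.startswith x p) = true) := by
    rw [pv_mem_phase (fun p n => PySem.Str.startswith n p),
      pv_mem_phase (fun p n => PySem.Str.isIn p n)]
    simp only [PySem.Set.empty, List.not_mem_nil, false_or]
    constructor
    · rintro (⟨-, h⟩ | ⟨-, h⟩)
      · exact Or.inl h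
      · exact Or.inr h
    · rintro (h | h)
      · exact Or.inl ⟨hxw, h⟩
      · exact Or.inr ⟨hxw, h⟩
  have hB : x ∈ (PySem.Set.ofList word_list).foldl (fun r name =>
        if !(PySem.Set.inter (pvDigramsB name) pvRejectSetB).isEmpty
            || PySem.Set.contains pvFirstSetB (PySem.Str.slice name none (some 2)) then
          PySem.Set.add r name
        else r) PySem.Set.empty ↔
      (!(PySem.Set.inter (pvDigramsB x) pvRejectSetB).isEmpty
        || PySem.Set.contains pvFirstSetB (PySem.Str.slice x none (some 2))) = true := by
    rw [pv_mem_foldl_addif (fun name =>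
      !(PySem.Set.inter (pvDigramsB name) pvRejectSetB).isEmpty
        || PySem.Set.contains pvFirstSetB (PySem.Str.slice name none (some 2)))]
    simp only [PySem.Set.empty, List.not_mem_nil, false_or]
    exact ⟨fun h => h.2, fun h => ⟨hxw, h⟩⟩
  have hmem := (hA.trans (pv_cond_eq x).symm).trans hB.symm
  congr 1
  rw [Bool.eq_iff_iff, PySem.Set.contains_iff, PySem.Set.contains_iff]
  exact hmem
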